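-- pv_equiv track=rewrite | github.com/Ka-raS/School-Code | Nam 2 Ky 2 - Lap trinh Python/178. TÍNH TÍCH CHẬP MA TRẬN.py | convolution_sum
-- ===== SOURCE A (Python) =====
-- from typing import List
--
-- def convolution_sum(image: List[List[int]], kernel: List[List[int]]) -> int:
--     result = 0
--
--     image_rows = len(image)
--     image_cols = len(image[0])
--
--     for i in range(image_rows - 2):
--         for j in range(image_cols - 2):
--             for ker_col in range(3):
--                 for ker_row in range(3):
--                     result += image[i + ker_row][j + ker_col] * kernel[ker_row][ker_col]
--
--     return result
-- ===== SOURCE B (Python) =====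
-- def convolution_sum(image, kernel):
--     rows = len(image)
--     cols = len(image[0])
--     if rows < 3 or cols < 3:
--         return 0
--     total = 0
--     for kr in range(3):
--         for kc in range(3):
--             block = 0
--             for row in image[kr:kr + rows - 2]:
--                 block += sum(row[kc:kc + cols - 2])
--             total += kernel[kr][kc] * block
--     return total
-- ===== Notes on version B (the rewrite author's own statement) =====
-- stated objective: faster
-- what changed: B replaces A's quadruple loop over every window position and kernel cell by nine per-kernel-cell block sums, each taken with builtin sum over rectangular slices of the image (plus an early return 0 when no 3x3 window fits).
import Mathlib
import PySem

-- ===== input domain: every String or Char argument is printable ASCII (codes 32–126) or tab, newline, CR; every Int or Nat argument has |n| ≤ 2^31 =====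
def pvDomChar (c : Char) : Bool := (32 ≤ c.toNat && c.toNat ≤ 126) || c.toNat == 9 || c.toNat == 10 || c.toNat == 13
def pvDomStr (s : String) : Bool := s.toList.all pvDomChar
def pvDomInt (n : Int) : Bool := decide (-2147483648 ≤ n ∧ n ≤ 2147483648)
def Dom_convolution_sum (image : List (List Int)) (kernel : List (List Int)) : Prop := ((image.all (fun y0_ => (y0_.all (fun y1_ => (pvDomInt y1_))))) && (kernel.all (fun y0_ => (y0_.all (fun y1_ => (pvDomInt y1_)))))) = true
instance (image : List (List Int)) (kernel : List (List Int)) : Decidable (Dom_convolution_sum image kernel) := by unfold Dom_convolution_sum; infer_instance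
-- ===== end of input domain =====

-- B replaces A's per-window quadruple loop by nine per-kernel-cell block sums taken over
-- slices of the image (alternative decomposition; return-value equivalence, no mutation).

-- ===== PORT A =====
def convolution_sum (image : List (List Int)) (kernel : List (List Int)) : Int :=
  let imageRows : Int := (image.length : Int)
  let imageCols : Int := ((PySem.List.pyGetD image 0 []).length : Int)
  (PySem.List.pyRange 0 (imageRows - 2) 1).foldl (fun result i =>
    (PySem.List.pyRange 0 (imageCols - 2) 1).foldl (fun result j =>
      (PySem.List.pyRange 0 3 1).foldl (fun result kerCol =>
        (PySem.List.pyRange 0 3 1).foldl (fun result kerRow =>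
          result + PySem.List.pyGetD (PySem.List.pyGetD image (i + kerRow) []) (j + kerCol) 0
                 * PySem.List.pyGetD (PySem.List.pyGetD kernel kerRow []) kerCol 0) result) result) result) 0

-- ===== PORT B =====
def convolution_sum_alt (image : List (List Int)) (kernel : List (List Int)) : Int :=
  let rows : Int := (image.length : Int)
  let cols : Int := ((PySem.List.pyGetD image 0 []).length : Int)
  if rows < 3 ∨ cols < 3 then 0 else
  (PySem.List.pyRange 0 3 1).foldl (fun total kr =>
    (PySem.List.pyRange 0 3 1).foldl (fun total kc =>
      total + PySem.List.pyGetD (PySem.List.pyGetD kernel kr []) kc 0 *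
        ((PySem.List.slice image (some kr) (some (kr + rows - 2))).foldl
          (fun b row => b + (PySem.List.slice row (some kc) (some (kc + cols - 2))).sum) 0)) total) 0

-- ===== PRECONDITION & SPEC =====
-- Pre_ excludes exactly the inputs on which A raises IndexError: the empty image (image[0]),
-- and — when at least one 3x3 window exists — images whose later rows are shorter than the
-- first row or kernels without 3 rows of 3 entries.
def Pre_convolution_sum (image : List (List Int)) (kernel : List (List Int)) : Prop :=
  image ≠ [] ∧
  (3 ≤ image.length → 3 ≤ (image.headD []).length →
    (∀ row ∈ image, (image.headD []).length ≤ row.length) ∧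
    3 ≤ kernel.length ∧ ∀ krow ∈ kernel.take 3, 3 ≤ krow.length)
instance (image : List (List Int)) (kernel : List (List Int)) : Decidable (Pre_convolution_sum image kernel) := by
  unfold Pre_convolution_sum; infer_instance

def pvWitness_convolution_sum : List (List Int) × List (List Int) :=
  ([[1, 2, 3], [4, 5, 6], [7, 8, 9]], [[1, 0, 0], [0, 1, 0], [0, 0, 1]])

def Spec_convolution_sum (image : List (List Int)) (kernel : List (List Int)) (out : Int) : Prop := out = convolution_sum_alt image kernel
instance (image : List (List Int)) (kernel : List (List Int)) (out : Int) : Decidable (Spec_convolution_sum image kernel out) := by unfold Spec_convolution_sum; infer_instance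

-- ===== CLAIM (what is proved, stated in full; the proofs are below) =====
def Claim_equal_convolution_sum : Prop := ∀ (image : List (List Int)) (kernel : List (List Int)), Dom_convolution_sum image kernel → Pre_convolution_sum image kernel → Spec_convolution_sum image kernel (convolution_sum image kernel)

-- ===== LEMMAS AND PROOFS =====

-- drop/take window of a list, written as a map over an index range
lemma pvWindow_eq_map_range {α : Type} (xs : List α) (d : α) (a m : Nat) (h : a + m ≤ xs.length) :
    (xs.drop a).take m = (List.range m).map (fun i => xs.getD (i + a) d) := by
  apply List.ext_getElem
  · simp; omega
  · intro i h1 h2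
    simp only [List.length_take, List.length_drop] at h1
    simp only [List.getElem_take, List.getElem_drop, List.getElem_map, List.getElem_range]
    rw [List.getD_eq_getElem xs d (by omega)]
    congr 1; omega

-- nonpositive stop gives the empty range
lemma pvRange_nonpos (e : Int) (h : e ≤ 0) : PySem.List.pyRange 0 e 1 = [] := by
  simp [PySem.List.pyRange]; omega

-- a cast-plus-cast Python index is the Nat index
lemma pvGetD_cast_add {α : Type} (xs : List α) (i k : Nat) (d : α) :
    PySem.List.pyGetD xs ((i : Int) + (k : Int)) d = xs.getD (i + k) d := by
  rw [← Nat.cast_add, PySem.List.pyGetD_natCast]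

lemma pvRange3 : PySem.List.pyRange 0 3 1 = [((0:Nat):Int), ((1:Nat):Int), ((2:Nat):Int)] := by decide

-- image element read as Nat-indexed getD
def pvF (image : List (List Int)) (r c : Nat) : Int := (image.getD r []).getD c 0

-- the block sum of kernel cell (kr,kc) over an m × n grid of window origins
def pvS (image : List (List Int)) (m n kr kc : Nat) : Int :=
  ((List.range m).map (fun i => ((List.range n).map (fun j => pvF image (i+kr) (j+kc))).sum)).sum

lemma pvRangeN : (List.range 3) = [0, 1, 2] := by decide

lemma pvListSum (n : Nat) (f : Nat → Int) : ((List.range n).map f).sum = ∑ x ∈ Finset.range n, f x := rfl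

-- A's two inner loops (over the kernel) add exactly the 3×3 window contribution
lemma pvInner (image kernel : List (List Int)) (r : Int) (i j : Nat) :
    List.foldl (fun result kerCol =>
      List.foldl (fun result kerRow =>
        result + PySem.List.pyGetD (PySem.List.pyGetD image ((i:Int) + kerRow) []) ((j:Int) + kerCol) 0
               * PySem.List.pyGetD (PySem.List.pyGetD kernel kerRow []) kerCol 0) result
        (PySem.List.pyRange 0 3 1)) r (PySem.List.pyRange 0 3 1)
    = r + ((List.range 3).map (fun kc => ((List.range 3).map (fun kr =>
        pvF image (i+kr) (j+kc) * pvF kernel kr kc)).sum)).sum := by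
  rw [pvRange3]
  simp only [List.foldl_cons, List.foldl_nil, pvRangeN, List.map_cons, List.map_nil,
    List.sum_cons, List.sum_nil, pvGetD_cast_add, PySem.List.pyGetD_natCast, pvF]
  ring

-- B's block fold for kernel cell (kr,kc) is the block sum pvS
lemma pvBlock (image : List (List Int)) (cols kr kc : Nat) (hkr : kr ≤ 2) (hkc : kc ≤ 2)
    (hlen : 3 ≤ image.length) (hcols : 3 ≤ cols)
    (hrows : ∀ row ∈ image, cols ≤ row.length) :
    (PySem.List.slice image (some (kr:Int)) (some ((kr:Int) + (image.length:Int) - 2))).foldl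
      (fun b row => b + (PySem.List.slice row (some (kc:Int))
        (some ((kc:Int) + (cols:Int) - 2))).sum) 0
    = pvS image (image.length - 2) (cols - 2) kr kc := by
  rw [show ((kr:Int) + (image.length:Int) - 2) = ((kr:Int) + ((image.length - 2 : Nat) : Int)) by
    rw [Nat.cast_sub (by omega)]; ring]
  rw [PySem.List.slice_natCast_add]
  rw [pvWindow_eq_map_range image [] kr (image.length - 2) (by omega)]
  rw [List.foldl_map, PySem.List.foldl_add]
  simp only [zero_add, pvS]
  congr 1
  apply List.map_congr_left
  intro i hi
  rw [List.mem_range] at hi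
  have hmem : image.getD (i + kr) [] ∈ image := by
    rw [List.getD_eq_getElem image [] (by omega)]
    exact List.getElem_mem _
  have hrl := hrows _ hmem
  rw [show ((kc:Int) + (cols:Int) - 2) = ((kc:Int) + ((cols - 2 : Nat) : Int)) by
    rw [Nat.cast_sub (by omega)]; ring]
  rw [PySem.List.slice_natCast_add]
  rw [pvWindow_eq_map_range (image.getD (i + kr) []) (0:Int) kc (cols - 2) (by omega)]
  simp [pvF]

-- ===== VERDICT (by name: the statement is the Claim_ definition above) =====
theorem convolution_sum_spec : Claim_equal_convolution_sum := by
  unfold Claim_equal_convolution_sum Spec_convolution_sum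
  intro image kernel _ hpre
  obtain ⟨hne, hrest⟩ := hpre
  simp only [convolution_sum, convolution_sum_alt]
  obtain ⟨r0, rest, rfl⟩ := List.exists_cons_of_ne_nil hne
  simp only [PySem.List.pyGetD_zero_cons]
  by_cases hbig : 3 ≤ (r0 :: rest).length ∧ 3 ≤ r0.length
  · -- main case: at least one 3×3 window
    obtain ⟨hlen, hcols⟩ := hbig
    obtain ⟨hrows, hk1, hk2⟩ := hrest hlen (by simpa using hcols)
    rw [if_neg (by omega)]
    -- A side: turn the window loops into a double sum of window contributions
    rw [show ((r0 :: rest).length : Int) - 2 = (((r0 :: rest).length - 2 : Nat) : Int) by omega]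
    rw [show (r0.length : Int) - 2 = ((r0.length - 2 : Nat) : Int) by omega]
    rw [PySem.List.pyRange_zero_natCast, PySem.List.pyRange_zero_natCast, List.foldl_map]
    rw [PySem.List.foldl_congr_mem _ _ (fun (result : Int) (i : Nat) => result +
      ((List.range (r0.length - 2)).map (fun j => ((List.range 3).map (fun kc =>
        ((List.range 3).map (fun kr =>
          pvF (r0 :: rest) (i+kr) (j+kc) * pvF kernel kr kc)).sum)).sum)).sum) 0
      (by
        intro acc i _
        rw [List.foldl_map]
        rw [PySem.List.foldl_congr_mem _ _ (fun (result : Int) (j : Nat) => result +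
          ((List.range 3).map (fun kc => ((List.range 3).map (fun kr =>
            pvF (r0 :: rest) (i+kr) (j+kc) * pvF kernel kr kc)).sum)).sum) acc
          (by intro acc' j _; exact pvInner (r0 :: rest) kernel acc' i j)]
        rw [PySem.List.foldl_add])]
    rw [PySem.List.foldl_add]
    -- B side: expand the nine kernel cells and rewrite each block fold as a block sum
    rw [pvRange3]
    simp only [List.foldl_cons, List.foldl_nil, PySem.List.pyGetD_natCast]
    rw [pvBlock (r0 :: rest) r0.length 0 0 (by omega) (by omega) hlen hcols hrows,
        pvBlock (r0 :: rest) r0.length 0 1 (by omega) (by omega) hlen hcols hrows,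
        pvBlock (r0 :: rest) r0.length 0 2 (by omega) (by omega) hlen hcols hrows,
        pvBlock (r0 :: rest) r0.length 1 0 (by omega) (by omega) hlen hcols hrows,
        pvBlock (r0 :: rest) r0.length 1 1 (by omega) (by omega) hlen hcols hrows,
        pvBlock (r0 :: rest) r0.length 1 2 (by omega) (by omega) hlen hcols hrows,
        pvBlock (r0 :: rest) r0.length 2 0 (by omega) (by omega) hlen hcols hrows,
        pvBlock (r0 :: rest) r0.length 2 1 (by omega) (by omega) hlen hcols hrows,
        pvBlock (r0 :: rest) r0.length 2 2 (by omega) (by omega) hlen hcols hrows]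
    -- both sides are now sums over the same nine block sums: distribute and compare
    simp only [pvF, pvS, pvRangeN, List.map_cons, List.map_nil, List.sum_cons, List.sum_nil,
      pvListSum, Finset.sum_add_distrib, Finset.mul_sum, zero_add, add_zero]
    simp only [mul_comm]
    ring
  · -- no window fits: both sides are 0
    rw [if_pos (by omega)]
    rcases Nat.lt_or_ge (r0 :: rest).length 3 with hsm | hge
    · rw [pvRange_nonpos (((r0 :: rest).length : Int) - 2) (by omega)]
      simp
    · rw [pvRange_nonpos ((r0.length : Int) - 2) (by omega)]
      simp only [List.foldl_nil]
      exact List.foldl_fixed _
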